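-- pv_equiv track=rewrite | github.com/bm2-lab/X-MOL | FT_to_prediction/pt_link_emb.py | find_last_atom
-- ===== SOURCE A (Python) =====
-- class token():
--     """
--     define the non_atom tokens and numeric tokens in the SMILES
--     """
--     def __init__(self):
--         self.non_atom = ('',' ','(',')','.','-',':','=','/','\\','#','1','2','3','4','5','6','7','8','9','%10','%11','%12','%13','%14')
--         self.bond = ('.','-',':','=','/','\\','#')
--         self.num = ('1','2','3','4','5','6','7','8','9','%10','%11','%12','%13','%14')
--         self.illegal = ('',' ','[',']')
--         self.branch = ('(',')')
--         self.ss = ('[SEP]','[CLS]','[UNK]','[MASK]','[PAD]')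
--
-- def find_last_atom(smis, idx):
--     """
--     find the last linked atom before atom at the location idx of splitted SMILES
--     :param smis: splitted SMILES
--     :param idx: the index of focused atom
--     :return: last atom index which link the atom at the location idx of splitted SMILES
--     """
--     tokens = token()
--     non_atom = tokens.non_atom
--     if idx == 0:
--         return None
--     else:
--         flag = 0
--         res = None
--         for f_idx in range(1,idx+1):
--             j_tk = smis[idx-f_idx]
--             if j_tk == ')':
--                 flag += 1
--             elif j_tk == '(' and flag != 0:
--                 flag -= 1
--             if flag == 0 and j_tk not in non_atom:
--                 res = idx - f_idx
--                 break
--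
--         return res
-- ===== SOURCE B (Python) =====
-- def find_last_atom(smis, idx):
--     """
--     find the last linked atom before atom at the location idx of splitted SMILES
--     (forward single pass with a branch-point stack instead of a backward balance scan)
--     """
--     non_atom = ('',' ','(',')','.','-',':','=','/','\\','#','1','2','3','4','5','6','7','8','9','%10','%11','%12','%13','%14')
--     if idx <= 0:
--         return None
--     cur = None
--     stack = []
--     for i, tk in enumerate(smis[:idx]):
--         if tk == '(':
--             stack.append(cur)
--         elif tk == ')':
--             cur = stack.pop() if stack else None
--         elif tk not in non_atom:
--             cur = i
--     return cur
-- ===== Notes on version B (the rewrite author's own statement) =====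
-- stated objective: alternative
-- what changed: Replaced A's backward scan (from idx-1 down to 0 with an integer parenthesis-balance counter and early break) by a forward single pass over the prefix smis[:idx] that maintains the last atom seen and a stack of branch-point atoms pushed at '(' and popped at ')'.
import Mathlib
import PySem

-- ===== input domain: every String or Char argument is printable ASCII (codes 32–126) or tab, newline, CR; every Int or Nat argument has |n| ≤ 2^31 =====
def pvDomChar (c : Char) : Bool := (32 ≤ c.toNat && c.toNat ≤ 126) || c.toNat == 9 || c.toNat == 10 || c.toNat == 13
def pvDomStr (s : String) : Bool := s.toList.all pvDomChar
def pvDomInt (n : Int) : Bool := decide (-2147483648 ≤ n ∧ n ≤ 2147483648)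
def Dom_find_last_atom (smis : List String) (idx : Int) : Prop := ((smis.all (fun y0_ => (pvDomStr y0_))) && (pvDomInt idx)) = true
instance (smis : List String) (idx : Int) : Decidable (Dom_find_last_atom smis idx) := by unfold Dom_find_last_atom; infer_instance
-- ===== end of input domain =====

-- B replaces A's backward scan with a parenthesis-balance counter by a forward single
-- pass keeping a stack of branch-point atoms (objective: alternative decomposition,
-- same asymptotic cost; return values proved equal on Pre_).

-- ===== PORT A =====
def nonAtomTokens : List String :=
  ["", " ", "(", ")", ".", "-", ":", "=", "/", "\\", "#",
   "1", "2", "3", "4", "5", "6", "7", "8", "9", "%10", "%11", "%12", "%13", "%14"]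

-- the 'for f_idx in range(1, idx+1)' loop with early break, state 'flag'
def find_last_atom_loop (smis : List String) (idx : Int) : List Int → Nat → Option Int
  | [], _ => none
  | f :: rest, flag =>
    match PySem.List.pyGet? smis (idx - f) with
    | none => none  -- Python raises IndexError here; excluded by Pre_find_last_atom
    | some j_tk =>
      let flag' := if j_tk = ")" then flag + 1
                   else if j_tk = "(" ∧ flag ≠ 0 then flag - 1
                   else flag
      if flag' = 0 ∧ j_tk ∉ nonAtomTokens then some (idx - f)
      else find_last_atom_loop smis idx rest flag'

def find_last_atom (smis : List String) (idx : Int) : Option Int :=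
  if idx = 0 then none
  else find_last_atom_loop smis idx (PySem.List.pyRange 1 (idx + 1) 1) 0

-- ===== PORT B =====
-- one step of B's forward scan: state (cur, stack)
def altStep (st : Option Int × List (Option Int)) (p : Int × String) :
    Option Int × List (Option Int) :=
  if p.2 = "(" then (st.1, st.1 :: st.2)
  else if p.2 = ")" then
    match st.2 with
    | [] => (none, [])
    | h :: r => (h, r)
  else if p.2 ∉ nonAtomTokens then (some p.1, st.2)
  else st

def find_last_atom_alt (smis : List String) (idx : Int) : Option Int :=
  if idx ≤ 0 then none
  else ((PySem.List.enumerate (PySem.List.slice smis none (some idx))).foldl altStep (none, [])).1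

-- ===== PRECONDITION & SPEC =====
-- Pre_ excludes exactly the inputs where A raises IndexError (1 ≤ idx with idx past the
-- end of smis, where smis[idx-1] is out of range); on those inputs B returns the scan of
-- the whole list instead.
def Pre_find_last_atom (smis : List String) (idx : Int) : Prop := idx ≤ (smis.length : Int)
instance (smis : List String) (idx : Int) : Decidable (Pre_find_last_atom smis idx) := by
  unfold Pre_find_last_atom; infer_instance

def pvWitness_find_last_atom : List String × Int := (["C", "(", "N", ")", "=", "C"], 5)

def Spec_find_last_atom (smis : List String) (idx : Int) (out : Option Int) : Prop :=
  out = find_last_atom_alt smis idx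
instance (smis : List String) (idx : Int) (out : Option Int) :
    Decidable (Spec_find_last_atom smis idx out) := by unfold Spec_find_last_atom; infer_instance

-- ===== CLAIM (what is proved, stated in full; the proofs are below) =====
def Claim_equal_find_last_atom : Prop :=
  ∀ (smis : List String) (idx : Int), Dom_find_last_atom smis idx →
    Pre_find_last_atom smis idx → Spec_find_last_atom smis idx (find_last_atom smis idx)

-- ===== LEMMAS AND PROOFS =====

-- A's scan, abstracted to an explicit (index, token) list processed left to right
-- (the list will be the reversed enumerated prefix).
def backScan : List (Int × String) → Nat → Option Int
  | [], _ => none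
  | (j, t) :: rest, flag =>
    let flag' := if t = ")" then flag + 1
                 else if t = "(" ∧ flag ≠ 0 then flag - 1
                 else flag
    if flag' = 0 ∧ t ∉ nonAtomTokens then some j else backScan rest flag'

theorem backScan_rparen (j : Int) (rest : List (Int × String)) (flag : Nat) :
    backScan ((j, ")") :: rest) flag = backScan rest (flag + 1) := by
  simp [backScan]

theorem backScan_lparen (j : Int) (rest : List (Int × String)) (flag : Nat) :
    backScan ((j, "(") :: rest) flag = backScan rest (flag - 1) := by
  rcases flag with _ | f <;>
    simp [backScan, show ("(" : String) ∈ nonAtomTokens from by decide]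

theorem backScan_nonatom (j : Int) (t : String) (rest : List (Int × String)) (flag : Nat)
    (hr : t ≠ ")") (hl : t ≠ "(") (h : t ∈ nonAtomTokens) :
    backScan ((j, t) :: rest) flag = backScan rest flag := by
  simp [backScan, hr, hl, h]

theorem backScan_atom (j : Int) (t : String) (rest : List (Int × String)) (flag : Nat)
    (h : t ∉ nonAtomTokens) :
    backScan ((j, t) :: rest) flag = if flag = 0 then some j else backScan rest flag := by
  have hr : t ≠ ")" := fun he => h (by rw [he]; decide)
  have hl : t ≠ "(" := fun he => h (by rw [he]; decide)
  rcases flag with _ | f <;> simp [backScan, hr, hl, h]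

-- reading B's state at balance depth k
def peek (st : Option Int × List (Option Int)) : Nat → Option Int
  | 0 => st.1
  | k + 1 => (st.2[k]?).join

theorem backScan_reverse_foldl (l : List (Int × String)) :
    ∀ k : Nat, backScan l.reverse k = peek (l.foldl altStep (none, [])) k := by
  induction l using List.reverseRecOn with
  | nil => intro k; cases k <;> simp [backScan, peek]
  | append_singleton l p ih =>
    intro k
    obtain ⟨j, t⟩ := p
    have hfold : ((l ++ [(j, t)]).foldl altStep (none, [])) =
        altStep (l.foldl altStep (none, [])) (j, t) := by simp
    rw [hfold, List.reverse_append]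
    simp only [List.reverse_singleton, List.singleton_append]
    set st := l.foldl altStep (none, []) with hst
    by_cases hrp : t = ")"
    · subst hrp
      have hstep : altStep st (j, ")") = (st.2.head?.join, st.2.tail) := by
        unfold altStep; cases st.2 <;> simp
      rw [hstep, backScan_rparen, ih (k + 1)]
      cases k with
      | zero => cases h : st.2 <;> simp [peek, h]
      | succ k => cases h : st.2 <;> simp [peek, h]
    · by_cases hlp : t = "("
      · subst hlp
        have hstep : altStep st (j, "(") = (st.1, st.1 :: st.2) := by
          unfold altStep; simp
        rw [hstep, backScan_lparen, ih (k - 1)]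
        cases k with
        | zero => simp [peek]
        | succ k => cases k <;> simp [peek]
      · by_cases hna : t ∈ nonAtomTokens
        · have hstep : altStep st (j, t) = st := by
            unfold altStep; simp [hrp, hlp, hna]
          rw [hstep, backScan_nonatom j t _ k hrp hlp hna]
          exact ih k
        · have hstep : altStep st (j, t) = (some j, st.2) := by
            unfold altStep; simp [hrp, hlp, hna]
          rw [hstep, backScan_atom j t _ k hna]
          cases k with
          | zero => simp [peek]
          | succ k => rw [if_neg (by omega), ih (k + 1)]; simp [peek]

-- the reversed enumerated prefix, built top index first
def descPairs (smis : List String) : Nat → List (Int × String)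
  | 0 => []
  | n + 1 => ((n : Int), smis.getD n "") :: descPairs smis n

theorem descPairs_eq_reverse_enumerate (smis : List String) :
    ∀ n : Nat, n ≤ smis.length →
      descPairs smis n = (PySem.List.enumerate (smis.take n)).reverse := by
  intro n
  induction n with
  | zero => intro _; simp [descPairs, PySem.List.enumerate_nil]
  | succ n ih =>
    intro h
    have hn : n < smis.length := by omega
    have htake : smis.take (n + 1) = smis.take n ++ [smis[n]] := by
      rw [List.take_add_one]; simp [List.getElem?_eq_getElem hn]
    rw [descPairs, htake, PySem.List.enumerate_append]
    have hlen : (smis.take n).length = n := by simp [Nat.min_eq_left (Nat.le_of_lt hn)]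
    simp only [hlen, PySem.List.enumerate_cons, PySem.List.enumerate_nil]
    rw [List.reverse_append]
    simp only [List.reverse_singleton, List.singleton_append]
    rw [ih (by omega)]
    congr 2
    · omega
    · simp [List.getD_eq_getElem?_getD, List.getElem?_eq_getElem hn]

-- A's loop over range(1, idx+1) equals backScan over descPairs
theorem loopA_eq_backScan (smis : List String) (idx : Int)
    (hlen : idx ≤ (smis.length : Int)) :
    ∀ (n : Nat) (flag : Nat), (n : Int) ≤ idx →
      find_last_atom_loop smis idx (PySem.List.pyRange (idx + 1 - n) (idx + 1) 1) flag =
        backScan (descPairs smis n) flag := by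
  intro n
  induction n with
  | zero =>
    intro flag _
    rw [PySem.List.pyRange_one_eq_nil (by omega)]
    simp [find_last_atom_loop, descPairs, backScan]
  | succ n ih =>
    intro flag hn
    have hcons := PySem.List.pyRange_one_cons
      (a := idx + 1 - (n + 1 : Nat)) (b := idx + 1) (by push_cast; omega)
    rw [hcons]
    have hix : idx - (idx + 1 - ((n : Int) + 1)) = (n : Int) := by ring
    have hnlt' : n < smis.length := by
      have : (n : Int) < (smis.length : Int) := by push_cast at hn ⊢; omega
      exact_mod_cast this
    simp only [find_last_atom_loop]
    push_cast
    rw [hix, PySem.List.pyGet?_natCast, List.getElem?_eq_getElem hnlt']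
    simp only [descPairs, backScan]
    have hget : smis.getD n "" = smis[n] := by
      simp [List.getD_eq_getElem?_getD, List.getElem?_eq_getElem hnlt']
    rw [hget]
    have harg : idx + 1 - ((n : Int) + 1) + 1 = idx + 1 - (n : Int) := by ring
    split_ifs <;> first
    | rfl
    | (rw [harg]; exact ih _ (by omega))

theorem main_equiv (smis : List String) (idx : Int)
    (hpre : idx ≤ (smis.length : Int)) :
    find_last_atom smis idx = find_last_atom_alt smis idx := by
  unfold find_last_atom find_last_atom_alt
  by_cases hle : idx ≤ 0
  · rw [if_pos hle]
    by_cases h0 : idx = 0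
    · rw [if_pos h0]
    · rw [if_neg h0, PySem.List.pyRange_one_eq_nil (by omega)]
      simp [find_last_atom_loop]
  · rw [if_neg hle, if_neg (by omega)]
    have hslice : PySem.List.slice smis none (some idx) = smis.take idx.toNat := by
      exact PySem.List.slice_to smis (by omega)
    have hn : ((idx.toNat : Int)) ≤ idx := by omega
    have hstart : idx + 1 - (idx.toNat : Int) = 1 := by omega
    have hmain := loopA_eq_backScan smis idx hpre idx.toNat 0 hn
    rw [hstart] at hmain
    rw [hmain, descPairs_eq_reverse_enumerate smis idx.toNat (by omega), hslice]
    exact backScan_reverse_foldl _ 0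

-- ===== VERDICT (by name: the statement is the Claim_ definition above) =====
theorem find_last_atom_spec : Claim_equal_find_last_atom := by
  intro smis idx _ hpre
  unfold Spec_find_last_atom
  exact main_equiv smis idx hpre
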